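-- pv_equiv track=rewrite | github.com/bamboosingsinwind/interview | interview_code/.history/python/xiecheng0504-3_20230508000944.py | check
-- ===== SOURCE A (Python) =====
-- def check(str):
--     n = len(str)
--
--     if n<3: return False
--
--     for i in range(n-1):
--         if str[i] == str[i+1] and str[i]!='?':
--             return False
--
--     for i in range(len(str)-2):
--         cnt = str[i:i+3].count('1')
--         if cnt % 2: return False   # odd counts are not minimal strings
--     return True
-- ===== SOURCE B (Python) =====
-- def check(str):
--     # one left-to-right pass keeping a two-character window (last two chars seen),
--     # instead of A's two index loops with slicing
--     if len(str) < 3: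
--         return False
--     a, b = str[0], str[1]
--     if a == b and a != '?':
--         return False
--     for c in str[2:]:
--         if b == c and b != '?':
--             return False
--         if ((a == '1') + (b == '1') + (c == '1')) % 2 == 1:
--             return False
--         a, b = b, c
--     return True
-- ===== Notes on version B (the rewrite author's own statement) =====
-- stated objective: alternative
-- what changed: Replaced A's two separate index loops (with per-position 3-char slicing and counting) by a single left-to-right pass that carries the last two characters as a sliding window and checks adjacency and triple parity incrementally.
import Mathlib
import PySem

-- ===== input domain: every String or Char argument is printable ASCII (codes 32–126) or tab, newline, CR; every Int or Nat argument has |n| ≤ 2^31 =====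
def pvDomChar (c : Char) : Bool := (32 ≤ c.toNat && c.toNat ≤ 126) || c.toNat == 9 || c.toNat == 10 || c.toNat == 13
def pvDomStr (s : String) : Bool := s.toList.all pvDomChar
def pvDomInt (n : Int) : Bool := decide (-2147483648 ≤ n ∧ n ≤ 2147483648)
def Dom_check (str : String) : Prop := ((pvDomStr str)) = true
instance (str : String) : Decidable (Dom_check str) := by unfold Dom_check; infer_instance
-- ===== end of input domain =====

-- B replaces A's two index loops (adjacency scan + per-position 3-char slice count)
-- by one pass carrying the last two characters as a sliding window (objective: alternative).

-- ===== PORT A =====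
-- A's two for-loops with early 'return False' become 'any' over the same index ranges;
-- str[i] is always in range here, so getD is exact; str[i:i+3] is drop/take (Python slices clamp).
def check (str : String) : Bool :=
  let cs := str.toList
  let n := cs.length
  if n < 3 then false
  else if (List.range (n - 1)).any
      (fun i => cs.getD i ' ' == cs.getD (i+1) ' ' && cs.getD i ' ' != '?') then false
  else if (List.range (n - 2)).any
      (fun i => ((cs.drop i).take 3).count '1' % 2 == 1) then false
  else true

-- ===== PORT B =====
-- the loop body of Source B: window (a, b), next char c
def goB (a b : Char) : List Char → Bool
  | [] => true
  | c :: rest =>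
    if b == c && b != '?' then false
    else if ((if a == '1' then 1 else 0) + (if b == '1' then 1 else 0)
              + (if c == '1' then (1 : Nat) else 0)) % 2 == 1 then false
    else goB b c rest

def check_alt (str : String) : Bool :=
  match str.toList with
  | a :: b :: c :: rest =>
      if a == b && a != '?' then false else goB a b (c :: rest)
  | _ => false

-- ===== PRECONDITION & SPEC =====
def Spec_check (str : String) (out : Bool) : Prop := out = check_alt str
instance (str : String) (out : Bool) : Decidable (Spec_check str out) := by unfold Spec_check; infer_instance

-- ===== CLAIM (what is proved, stated in full; the proofs are below) =====
def Claim_equal_check : Prop := ∀ (str : String), Dom_check str → Spec_check str (check str)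

-- ===== LEMMAS AND PROOFS =====

-- recursive characterisations of the two conditions
def adjOK : List Char → Bool
  | a :: b :: t => !(a == b && a != '?') && adjOK (b :: t)
  | _ => true

def triOK : List Char → Bool
  | a :: b :: c :: t =>
      (((if a == '1' then 1 else 0) + (if b == '1' then 1 else 0)
        + (if c == '1' then (1 : Nat) else 0)) % 2 == 0) && triOK (b :: c :: t)
  | _ => true

theorem adjOK_range (cs : List Char) :
    ((List.range (cs.length - 1)).any
      (fun i => cs.getD i ' ' == cs.getD (i+1) ' ' && cs.getD i ' ' != '?')) = !adjOK cs := by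
  induction cs with
  | nil => simp [adjOK]
  | cons a t ih =>
    cases t with
    | nil => simp [adjOK]
    | cons b u =>
      have h : (a :: b :: u).length - 1 = (b :: u).length - 1 + 1 := by
        simp
      rw [adjOK, h, List.range_succ_eq_map, List.any_cons, List.any_map]
      simp only [List.getD_cons_zero, List.getD_cons_succ, Function.comp_def] at ih ⊢
      rw [ih]
      cases hx : (a == b && a != '?') <;> cases adjOK (b :: u) <;> simp [hx]

theorem count_take3 (a b c : Char) (t : List Char) :
    ((a :: b :: c :: t).take 3).count '1'
      = (if a == '1' then 1 else 0) + (if b == '1' then 1 else 0)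
        + (if c == '1' then 1 else 0) := by
  simp [List.take, List.count_cons]
  split_ifs <;> simp_all [beq_iff_eq] <;> omega

theorem triOK_range (cs : List Char) :
    ((List.range (cs.length - 2)).any
      (fun i => ((cs.drop i).take 3).count '1' % 2 == 1)) = !triOK cs := by
  induction cs with
  | nil => simp [triOK]
  | cons a t ih =>
    cases t with
    | nil => simp [triOK]
    | cons b u =>
      cases u with
      | nil => simp [triOK]
      | cons c v =>
        have h : (a :: b :: c :: v).length - 2 = (b :: c :: v).length - 2 + 1 := by
          simp
        rw [triOK, h, List.range_succ_eq_map, List.any_cons, List.any_map]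
        simp only [List.drop_zero, Function.comp_def, List.drop_succ_cons] at ih ⊢
        rw [ih, count_take3]
        set m := (if a == '1' then 1 else 0) + (if b == '1' then 1 else 0)
          + (if c == '1' then (1:Nat) else 0) with hm
        cases hx : (m % 2 == 1)
        · have h0 : (m % 2 == 0) = true := by
            rcases Nat.mod_two_eq_zero_or_one m with h | h
            · simp [h]
            · simp [h] at hx
          cases triOK (b :: c :: v) <;> simp [hx, h0]
        · have h0 : (m % 2 == 0) = false := by
            rcases Nat.mod_two_eq_zero_or_one m with h | h
            · simp [h] at hx
            · simp [h]
          cases triOK (b :: c :: v) <;> simp [hx, h0]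

-- B's loop computes adjacency-from-b and triples-from-a
theorem goB_eq (a b : Char) (l : List Char) :
    goB a b l = (adjOK (b :: l) && triOK (a :: b :: l)) := by
  induction l generalizing a b with
  | nil => simp [goB, adjOK, triOK]
  | cons c t ih =>
    rw [goB, ih]
    have hA : adjOK (b :: c :: t) = (!(b == c && b != '?') && adjOK (c :: t)) := rfl
    have hT : triOK (a :: b :: c :: t)
        = ((((if a == '1' then 1 else 0) + (if b == '1' then 1 else 0)
            + (if c == '1' then (1:Nat) else 0)) % 2 == 0) && triOK (b :: c :: t)) := rfl
    rw [hA, hT]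
    set m := (if a == '1' then 1 else 0) + (if b == '1' then 1 else 0)
      + (if c == '1' then (1:Nat) else 0) with hm
    cases hx : (b == c && b != '?')
    · cases hy : (m % 2 == 1)
      · have h0 : (m % 2 == 0) = true := by
          rcases Nat.mod_two_eq_zero_or_one m with h | h
          · simp [h]
          · simp [h] at hy
        cases adjOK (c :: t) <;> cases triOK (b :: c :: t) <;> simp [hx, hy, h0]
      · have h0 : (m % 2 == 0) = false := by
          rcases Nat.mod_two_eq_zero_or_one m with h | h
          · simp [h] at hy
          · simp [h]
        simp [hx, hy, h0]
    · simp [hx]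

-- ===== VERDICT (by name: the statement is the Claim_ definition above) =====
theorem check_spec : Claim_equal_check := by
  intro str _
  unfold Spec_check check check_alt
  cases hcs : str.toList with
  | nil => simp
  | cons a t =>
    cases t with
    | nil => simp
    | cons b u =>
      cases u with
      | nil => simp
      | cons c v =>
        simp only [hcs]
        have hn : ¬ ((a :: b :: c :: v).length < 3) := by simp
        rw [if_neg hn, goB_eq, adjOK_range, triOK_range]
        have hA : adjOK (a :: b :: c :: v)
            = (!(a == b && a != '?') && adjOK (b :: c :: v)) := rfl
        rw [hA]
        cases hx : (a == b && a != '?') <;>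
          cases hy : adjOK (b :: c :: v) <;>
          cases hz : triOK (a :: b :: c :: v) <;>
          simp [hx, hy, hz]
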